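-- pv_equiv track=rewrite | github.com/Mart1n66/school | python/fundamentals/listy.4.py | F
-- ===== SOURCE A (Python) =====
-- def F(t):
--     najvacsi = ''
--     dlzka = 0
--     for prvok in t:
--         retazec_roznych = ''
--         for znak in prvok:
--             if znak not in retazec_roznych:
--                 retazec_roznych += znak
--         if dlzka < len(retazec_roznych):
--             najvacsi = prvok
--             dlzka = len(retazec_roznych)
--     return najvacsi
-- ===== SOURCE B (Python) =====
-- def F(t):
--     if not t:
--         return ''
--     return sorted(t, key=lambda s: len(set(s)), reverse=True)[0]
-- ===== Notes on version B (the rewrite author's own statement) =====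
-- stated objective: simpler
-- what changed: Replaces A's tracking scan (best-so-far string plus distinct-char string built by an inner membership loop) with a guard plus a stable reverse sort by len(set(s)) and picking the first element.
import Mathlib
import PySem

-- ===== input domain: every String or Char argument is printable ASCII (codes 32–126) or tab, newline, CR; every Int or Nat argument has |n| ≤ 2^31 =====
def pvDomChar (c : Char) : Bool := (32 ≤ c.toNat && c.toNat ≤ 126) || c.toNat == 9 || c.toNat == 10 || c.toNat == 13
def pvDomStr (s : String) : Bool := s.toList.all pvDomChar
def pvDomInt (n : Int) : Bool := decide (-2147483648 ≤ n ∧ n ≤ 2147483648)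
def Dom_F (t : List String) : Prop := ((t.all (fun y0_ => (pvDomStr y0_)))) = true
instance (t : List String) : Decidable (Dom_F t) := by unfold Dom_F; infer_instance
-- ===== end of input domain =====

-- B replaces A's best-so-far tracking scan by a stable reverse sort on the
-- distinct-character count and picking the first element (objective: simpler).

-- ===== PORT A =====
def F (t : List String) : String :=
  (t.foldl (fun (st : String × Int) prvok =>
      let retazec : List Char := prvok.toList.foldl
        (fun acc znak => if znak ∈ acc then acc else acc ++ [znak]) []
      if st.2 < (retazec.length : Int) then (prvok, (retazec.length : Int)) else st)
    ("", 0)).1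

-- ===== PORT B =====
def pvKey (s : String) : Int := ((PySem.Set.ofList s.toList).length : Int)

def F_alt (t : List String) : String :=
  match PySem.List.sorted t pvKey true with
  | [] => ""
  | m :: _ => m

-- ===== PRECONDITION & SPEC =====
def Spec_F (t : List String) (out : String) : Prop := out = F_alt t
instance (t : List String) (out : String) : Decidable (Spec_F t out) := by unfold Spec_F; infer_instance

-- ===== CLAIM (what is proved, stated in full; the proofs are below) =====
def Claim_equal_F : Prop := ∀ (t : List String), Dom_F t → Spec_F t (F t)

-- ===== LEMMAS AND PROOFS =====

-- the comparator B's reverse sort uses, and the best-so-far step A's scan amounts to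
def pvBefore (a b : String) : Bool := decide (pvKey b < pvKey a)
def pvG (naj p : String) : String := if pvKey naj < pvKey p then p else naj

-- A's inner loop builds exactly set(prvok) (first occurrences of the characters)
theorem pv_inner_fold (l : List Char) : ∀ (acc : List Char),
    l.foldl (fun acc znak => if znak ∈ acc then acc else acc ++ [znak]) acc =
      List.foldl PySem.Set.add acc l := by
  induction l with
  | nil => intro acc; rfl
  | cons c l ih =>
      intro acc
      simp only [List.foldl_cons, ih, PySem.Set.add]
      split_ifs <;> simp_all

theorem pv_inner_eq_ofList (l : List Char) :
    l.foldl (fun acc znak => if znak ∈ acc then acc else acc ++ [znak]) [] =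
      PySem.Set.ofList l :=
  pv_inner_fold l []

-- A's loop body, with the inner loop replaced by its value set(prvok)
def pvStep (st : String × Int) (p : String) : String × Int :=
  if st.2 < pvKey p then (p, pvKey p) else st

theorem pv_step_eq :
    (fun (st : String × Int) prvok =>
      let retazec : List Char := prvok.toList.foldl
        (fun acc znak => if znak ∈ acc then acc else acc ++ [znak]) []
      if st.2 < (retazec.length : Int) then (prvok, (retazec.length : Int)) else st) = pvStep := by
  funext st p
  simp only [pv_inner_eq_ofList, pvStep, pvKey]

-- A's pair state keeps dlzka = pvKey najvacsi, so the scan is a foldl of pvG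
theorem pv_foldA (xs : List String) : ∀ (naj : String),
    xs.foldl pvStep (naj, pvKey naj) = (xs.foldl pvG naj, pvKey (xs.foldl pvG naj)) := by
  induction xs with
  | nil => intro naj; rfl
  | cons x xs ih =>
      intro naj
      simp only [List.foldl_cons, pvStep, pvG]
      by_cases h : pvKey naj < pvKey x
      · simp only [if_pos h]; exact ih x
      · simp only [if_neg h]; exact ih naj

theorem pv_insertBy_cons (x a : String) (acc : List String) :
    PySem.List.insertBy pvBefore x (a :: acc) =
      if pvKey a < pvKey x then x :: a :: acc
      else a :: PySem.List.insertBy pvBefore x acc := by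
  simp [PySem.List.insertBy, pvBefore]

-- the head of the insertion-sort accumulator evolves exactly by pvG
theorem pv_head_foldl_ins (xs : List String) : ∀ (a : String) (acc : List String),
    (List.foldl (fun acc x => PySem.List.insertBy pvBefore x acc) (a :: acc) xs).head? =
      some (List.foldl pvG a xs) := by
  induction xs with
  | nil => intro a acc; rfl
  | cons x xs ih =>
      intro a acc
      simp only [List.foldl_cons, pv_insertBy_cons]
      by_cases h : pvKey a < pvKey x
      · simp only [if_pos h]; rw [ih]; simp [pvG, h]
      · simp only [if_neg h]; rw [ih]; simp [pvG, h]

theorem pv_key_nonneg (s : String) : 0 ≤ pvKey s := by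
  simp [pvKey]

theorem pv_key_zero (s : String) (h : pvKey s = 0) : s = "" := by
  have hl : PySem.Set.ofList s.toList = [] := by
    have := h
    simp only [pvKey, Int.natCast_eq_zero, List.length_eq_zero_iff] at this
    exact this
  have ht : s.toList = [] := by
    cases hs : s.toList with
    | nil => rfl
    | cons c cs =>
        exfalso
        have : c ∈ PySem.Set.ofList s.toList := by
          rw [PySem.Set.mem_ofList, hs]; exact List.mem_cons_self ..
        rw [hl] at this; exact (List.not_mem_nil) this
  exact String.toList_inj.mp (by rw [ht]; rfl)

theorem pv_g_empty (x : String) : pvG "" x = x := by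
  unfold pvG
  by_cases h : pvKey "" < pvKey x
  · rw [if_pos h]
  · rw [if_neg h]
    have h0 : pvKey x = 0 := by
      have := pv_key_nonneg x
      have he : pvKey "" = 0 := by decide
      rw [he] at h; omega
    exact (pv_key_zero x h0).symm

-- ===== VERDICT (by name: the statement is the Claim_ definition above) =====
theorem F_spec : Claim_equal_F := by
  intro t _
  unfold Spec_F
  cases t with
  | nil => rfl
  | cons x0 rest =>
      have hA : F (x0 :: rest) = List.foldl pvG x0 rest := by
        unfold F
        rw [pv_step_eq]
        have h0 : ((("" : String), (0 : Int))) = ("", pvKey "") := by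
          have : pvKey "" = 0 := by decide
          rw [this]
        rw [h0, pv_foldA]
        simp only [List.foldl_cons, pv_g_empty]
      have hsort : PySem.List.sorted (x0 :: rest) pvKey true =
          List.foldl (fun acc x => PySem.List.insertBy pvBefore x acc) [x0] rest := by
        rw [PySem.List.sorted_rev_eq_foldl_insertBy]
        rfl
      have hhead : (PySem.List.sorted (x0 :: rest) pvKey true).head? =
          some (List.foldl pvG x0 rest) := by
        rw [hsort]; exact pv_head_foldl_ins rest x0 []
      unfold F_alt
      rw [hA]
      cases hs : PySem.List.sorted (x0 :: rest) pvKey true with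
      | nil => rw [hs] at hhead; simp at hhead
      | cons m tl =>
          rw [hs] at hhead
          simp only [List.head?_cons, Option.some.injEq] at hhead
          simp [hhead]
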